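-- pv_equiv track=rewrite | github.com/abil-nrg/min_span_arbour_sim | Loop_Erasure_Grid.py | loop_erasure
-- ===== SOURCE A (Python) =====
-- def loop_erasure(path):
--     latest_occurrence = {} # First Pass: Record the latest occurrence of each point
--     for i, point in enumerate(path):
--         latest_occurrence[point] = i
--     erased_path = []
--     i = 0 # Second Pass: Use the dictionary to skip over points leading into loops
--     while i < len(path):
--         point = path[i]
--         erased_path.append(point)
--         i = latest_occurrence[point] + 1
--
--     return erased_path
-- ===== SOURCE B (Python) =====
-- def loop_erasure(path):
--     stack = []
--     pos = {}  # point currently on the stack -> its index in the stack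
--     for point in path:
--         if point in pos:
--             k = pos[point] + 1
--             for p in stack[k:]:
--                 del pos[p]
--             del stack[k:]
--         else:
--             pos[point] = len(stack)
--             stack.append(point)
--     return stack
-- ===== Notes on version B (the rewrite author's own statement) =====
-- stated objective: alternative
-- what changed: Replaces A's two-pass scheme (precompute each point's last occurrence in a dict, then jump i to last_occurrence[path[i]]+1) with a single forward pass maintaining a result stack plus a point-to-stack-index dict: a revisited point truncates the stack back to its recorded position (deleting the popped points' positions), otherwise the point is pushed.
import Mathlib
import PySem

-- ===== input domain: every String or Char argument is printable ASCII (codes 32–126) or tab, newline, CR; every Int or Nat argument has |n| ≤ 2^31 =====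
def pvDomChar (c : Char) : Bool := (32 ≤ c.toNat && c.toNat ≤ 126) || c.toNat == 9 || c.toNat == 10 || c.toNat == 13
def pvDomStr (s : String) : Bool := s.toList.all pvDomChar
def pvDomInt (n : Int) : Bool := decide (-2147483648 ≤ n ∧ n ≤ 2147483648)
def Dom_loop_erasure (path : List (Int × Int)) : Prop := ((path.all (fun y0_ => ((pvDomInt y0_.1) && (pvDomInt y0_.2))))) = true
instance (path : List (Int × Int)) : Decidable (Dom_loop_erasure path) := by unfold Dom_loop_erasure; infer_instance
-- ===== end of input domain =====

-- B replaces A's two-pass "record last occurrence, then jump" loop-erasure with a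
-- one-pass stack rollback keeping a point -> stack-index dict (objective: alternative).

-- ===== PORT A =====
-- The while loop of A: i strictly increases each iteration (the stored index of path[i]
-- is ≥ i), so `path.length` steps of fuel always suffice; the fuel-0 and `none` fallbacks
-- are unreachable on any actual run (Python indexes in range, key always present).
def loopErasureWhile (path : List (Int × Int)) (d : PySem.Dict (Int × Int) Int) :
    Nat → Int → List (Int × Int) → List (Int × Int)
  | 0, _, acc => acc
  | fuel + 1, i, acc =>
    if i < (path.length : Int) then
      match PySem.List.pyGet? path i with
      | some point =>
        match d.get? point with
        | some j => loopErasureWhile path d fuel (j + 1) (acc ++ [point])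
        | none => acc ++ [point]   -- unreachable: point ∈ path, so the dict has it
      | none => acc                -- unreachable: 0 ≤ i < len(path)
    else acc

def loop_erasure (path : List (Int × Int)) : List (Int × Int) :=
  -- First pass: latest_occurrence[point] = i  for i, point in enumerate(path)
  let latest := (PySem.List.enumerate path).foldl
      (fun acc p => acc.insert p.2 p.1) PySem.Dict.empty
  -- Second pass: while i < len(path): append path[i]; i = latest[path[i]] + 1
  loopErasureWhile path latest path.length 0 []

-- ===== PORT B =====
-- the body of B's for-loop: one stack/pos update
def loopEraseStep (st : List (Int × Int) × PySem.Dict (Int × Int) Int)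
    (point : Int × Int) : List (Int × Int) × PySem.Dict (Int × Int) Int :=
  match st.2.get? point with              -- "if point in pos"
  | some j =>
    let removed := PySem.List.slice st.1 (some (j + 1)) none   -- stack[k:]
    (PySem.List.slice st.1 none (some (j + 1)),                -- del stack[k:]
     removed.foldl (fun d p => d.erase p) st.2)                -- for p in …: del pos[p]
  | none =>
    (st.1 ++ [point], st.2.insert point (st.1.length : Int))

def loop_erasure_alt (path : List (Int × Int)) : List (Int × Int) :=
  (path.foldl loopEraseStep ([], PySem.Dict.empty)).1

-- ===== PRECONDITION & SPEC =====
def Spec_loop_erasure (path : List (Int × Int)) (out : List (Int × Int)) : Prop := out = loop_erasure_alt path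
instance (path : List (Int × Int)) (out : List (Int × Int)) : Decidable (Spec_loop_erasure path out) := by unfold Spec_loop_erasure; infer_instance

-- ===== CLAIM (what is proved, stated in full; the proofs are below) =====
def Claim_equal_loop_erasure : Prop := ∀ (path : List (Int × Int)), Dom_loop_erasure path → Spec_loop_erasure path (loop_erasure path)

-- ===== LEMMAS AND PROOFS =====

-- the longest suffix of t that does not contain x (= what remains after the last occurrence of x)
def dropAfterLast {α : Type} [DecidableEq α] (x : α) (t : List α) : List α :=
  (t.reverse.takeWhile (fun y => decide (y ≠ x))).reverse

theorem length_dropAfterLast {α : Type} [DecidableEq α] (x : α) (t : List α) :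
    (dropAfterLast x t).length ≤ t.length := by
  calc (dropAfterLast x t).length = (t.reverse.takeWhile (fun y => decide (y ≠ x))).length := by
        simp [dropAfterLast]
    _ ≤ t.reverse.length := (List.takeWhile_sublist _).length_le
    _ = t.length := by simp

-- the common specification: loop erasure by front recursion
def leSpec : List (Int × Int) → List (Int × Int)
  | [] => []
  | x :: t => x :: leSpec (dropAfterLast x t)
termination_by l => l.length
decreasing_by
  simpa using Nat.lt_succ_of_le (length_dropAfterLast x t)

theorem dropAfterLast_of_not_mem {α : Type} [DecidableEq α] {x : α} {t : List α}
    (h : x ∉ t) : dropAfterLast x t = t := by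
  unfold dropAfterLast
  rw [List.takeWhile_eq_self_iff.mpr, List.reverse_reverse]
  intro y hy
  simp only [decide_eq_true_eq]
  intro he; subst he
  exact h (List.mem_reverse.mp hy)

theorem dropAfterLast_append_cons {α : Type} [DecidableEq α] {x : α} {b : List α}
    (c : List α) (h : x ∉ b) : dropAfterLast x (c ++ x :: b) = b := by
  unfold dropAfterLast
  rw [show (c ++ x :: b).reverse = b.reverse ++ x :: c.reverse by simp]
  rw [List.takeWhile_append_of_pos ?_ ]
  · simp
  · intro y hy
    simp only [decide_eq_true_eq]
    intro he; subst he
    exact h (List.mem_reverse.mp hy)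

theorem dropAfterLast_append_singleton {α : Type} [DecidableEq α] {x y : α}
    (t : List α) (h : x ≠ y) : dropAfterLast x (t ++ [y]) = dropAfterLast x t ++ [y] := by
  unfold dropAfterLast
  simp [Ne.symm h]

theorem dropAfterLast_append_self {α : Type} [DecidableEq α] (x : α) (t : List α) :
    dropAfterLast x (t ++ [x]) = [] := by
  unfold dropAfterLast
  simp

-- B's per-element stack update, without the position dict
def stepB (s : List (Int × Int)) (x : Int × Int) : List (Int × Int) :=
  match PySem.List.index? s x with
  | some j => s.take (j + 1)
  | none => s ++ [x]

-- the key structural fact: leSpec obeys the stack-rollback recurrence on snoc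
theorem leSpec_append_singleton (P : List (Int × Int)) (x : Int × Int) :
    leSpec (P ++ [x]) = stepB (leSpec P) x := by
  induction hn : P.length using Nat.strong_induction_on generalizing P with
  | _ n IH =>
    match P with
    | [] =>
      simp [leSpec, stepB, dropAfterLast, PySem.List.index?_eq_idxOf?]
    | h :: t =>
      by_cases hx : h = x
      · subst hx
        rw [show (h :: t) ++ [h] = h :: (t ++ [h]) by simp]
        rw [leSpec, dropAfterLast_append_self, leSpec, stepB, leSpec]
        rw [PySem.List.index?_cons_self]
        rfl
      · rw [show (h :: t) ++ [x] = h :: (t ++ [x]) by simp]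
        rw [leSpec, dropAfterLast_append_singleton t hx]
        have hlen : (dropAfterLast h t).length < n := by
          subst hn
          exact Nat.lt_succ_of_le (length_dropAfterLast h t)
        rw [IH _ hlen (dropAfterLast h t) rfl]
        rw [leSpec, stepB, stepB]
        rw [PySem.List.index?_cons_of_ne _ hx]
        cases hidx : PySem.List.index? (leSpec (dropAfterLast h t)) x with
        | none => simp
        | some j => simp [List.take_succ_cons]

def stackOf (P : List (Int × Int)) : List (Int × Int) := P.foldl stepB []

theorem leSpec_eq_stackOf (P : List (Int × Int)) : stackOf P = leSpec P := by
  induction P using List.reverseRecOn with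
  | nil => simp [stackOf, leSpec]
  | append_singleton P x IH =>
    rw [stackOf, List.foldl_append, List.foldl_cons, List.foldl_nil,
      ← stackOf, IH, ← leSpec_append_singleton]

-- the position dict that B maintains alongside the stack s
def posOf (s : List (Int × Int)) : PySem.Dict (Int × Int) Int :=
  PySem.Dict.mk ((PySem.List.enumerate s).map (fun p => (p.2, p.1)))

theorem get?_posOf_aux (s : List (Int × Int)) (x : Int × Int) (n : Int) :
    (PySem.Dict.mk ((PySem.List.enumerate s n).map (fun p => (p.2, p.1)))).get? x
      = (PySem.List.index? s x).map (fun k => n + (k : Int)) := by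
  induction s generalizing n with
  | nil => simp [PySem.List.enumerate_nil, PySem.List.index?_eq_idxOf?, PySem.Dict.get?]
  | cons y s IH =>
    rw [PySem.List.enumerate_cons]
    simp only [List.map_cons]
    rw [PySem.Dict.get?_mk_cons]
    by_cases hyx : y = x
    · subst hyx
      rw [if_pos (by simp), PySem.List.index?_cons_self]
      simp
    · rw [if_neg (by simpa using hyx), IH, PySem.List.index?_cons_of_ne _ hyx]
      cases PySem.List.index? s x with
      | none => simp
      | some k => simp [Option.map_some]; ring

theorem get?_posOf (s : List (Int × Int)) (x : Int × Int) :
    (posOf s).get? x = (PySem.List.index? s x).map (fun k => (k : Int)) := by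
  rw [posOf, show PySem.List.enumerate s = PySem.List.enumerate s 0 from rfl, get?_posOf_aux]
  cases PySem.List.index? s x <;> simp

-- erasing, one by one, keys that form exactly the tail of the items list
theorem foldl_erase_tail (R : List (Int × Int)) :
    ∀ (l1 l2 : List ((Int × Int) × Int)), l2.map (·.1) = R → R.Nodup →
    (∀ r ∈ R, r ∉ l1.map (·.1)) →
    R.foldl (fun d p => d.erase p) (PySem.Dict.mk (l1 ++ l2)) = PySem.Dict.mk l1 := by
  induction R with
  | nil =>
    intro l1 l2 hmap _ _
    have h2 : l2 = [] := List.map_eq_nil_iff.mp hmap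
    simp [h2]
  | cons r R IH =>
    intro l1 l2 hmap hnd hdisj
    match l2 with
    | [] => simp at hmap
    | (k, v) :: l2' =>
      simp only [List.map_cons, List.cons.injEq] at hmap
      obtain ⟨hk, hmap'⟩ := hmap
      subst hk
      rw [List.foldl_cons]
      have herase : (PySem.Dict.mk (l1 ++ (k, v) :: l2')).erase k = PySem.Dict.mk (l1 ++ l2') := by
        show PySem.Dict.mk (List.filter _ _) = _
        congr 1
        rw [List.filter_append]
        have h1 : l1.filter (fun p => !p.1 == k) = l1 := by
          rw [List.filter_eq_self]
          intro p hp
          have hne : p.1 ≠ k := by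
            intro he
            exact (hdisj k (by simp)) (he ▸ List.mem_map_of_mem hp)
          simpa using hne
        have h2 : ((k, v) :: l2').filter (fun p => !p.1 == k) = l2' := by
          have hcond : ¬((!(k, v).1 == k) = true) := by simp
          rw [List.filter_cons, if_neg hcond]
          rw [List.filter_eq_self]
          intro p hp
          have hne : p.1 ≠ k := by
            intro he
            have hmm : k ∈ l2'.map (·.1) := he ▸ List.mem_map_of_mem hp
            rw [hmap'] at hmm
            exact (List.nodup_cons.mp hnd).1 hmm
          simpa using hne
        rw [h1, h2]
      rw [herase]
      exact IH l1 l2' hmap' (List.nodup_cons.mp hnd).2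
        (fun a ha => hdisj a (List.mem_cons_of_mem _ ha))

theorem nodup_stepB {s : List (Int × Int)} (x : Int × Int) (h : s.Nodup) :
    (stepB s x).Nodup := by
  unfold stepB
  cases hidx : PySem.List.index? s x with
  | some j => exact (List.take_sublist _ _).nodup h
  | none =>
    have hx : x ∉ s := (PySem.List.index?_eq_none_iff _ _).mp hidx
    refine List.Nodup.append h (List.nodup_singleton x) ?_
    intro a ha hb
    rw [List.mem_singleton] at hb
    subst hb
    exact hx ha

-- one step of B's fold, in terms of stepB and posOf
theorem stepB_fold_step (s : List (Int × Int)) (x : Int × Int) (hnd : s.Nodup) :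
    loopEraseStep (s, posOf s) x = (stepB s x, posOf (stepB s x)) := by
  rw [loopEraseStep, get?_posOf]
  cases hidx : PySem.List.index? s x with
  | none =>
    -- x not on the stack: append and record its position
    have hsx : stepB s x = s ++ [x] := by rw [stepB, hidx]
    show ((s ++ [x], (posOf s).insert x (s.length : Int)) :
        List (Int × Int) × PySem.Dict (Int × Int) Int) = (stepB s x, posOf (stepB s x))
    rw [hsx]
    refine Prod.ext rfl ?_
    show (posOf s).insert x (s.length : Int) = posOf (s ++ [x])
    have hx : x ∉ s := (PySem.List.index?_eq_none_iff _ _).mp hidx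
    have hnc : (posOf s).contains x = false := by
      rw [PySem.Dict.contains_eq_isSome_get?, get?_posOf, hidx]
      rfl
    apply PySem.Dict.ext
    rw [PySem.Dict.items_insert_of_not_contains _ _ hnc]
    show (posOf s).items ++ _ = (PySem.Dict.mk ((PySem.List.enumerate (s ++ [x])).map (fun p => (p.2, p.1)))).items
    rw [show PySem.List.enumerate (s ++ [x]) = PySem.List.enumerate s ++ [((0 + s.length : Int), x)] by
      rw [PySem.List.enumerate_append]; rfl]
    simp [posOf]
  | some k =>
    have hsx : stepB s x = s.take (k + 1) := by rw [stepB, hidx]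
    show ((PySem.List.slice s none (some ((k : Int) + 1)),
        (PySem.List.slice s (some ((k : Int) + 1)) none).foldl (fun d p => d.erase p) (posOf s)) :
        List (Int × Int) × PySem.Dict (Int × Int) Int) = (stepB s x, posOf (stepB s x))
    have hcast : (k : Int) + 1 = ((k + 1 : Nat) : Int) := by push_cast; ring
    have hslice1 : PySem.List.slice s none (some ((k : Int) + 1)) = s.take (k + 1) := by
      rw [hcast, PySem.List.slice_to_natCast]
    have hslice2 : PySem.List.slice s (some ((k : Int) + 1)) none = s.drop (k + 1) := by
      rw [hcast, PySem.List.slice_from_natCast]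
    rw [hslice1, hslice2, hsx]
    refine Prod.ext rfl ?_
    show (s.drop (k + 1)).foldl (fun d p => d.erase p) (posOf s) = posOf (s.take (k + 1))
    -- split the items of posOf s at position k+1
    have hsplit : PySem.List.enumerate s = PySem.List.enumerate (s.take (k + 1))
        ++ PySem.List.enumerate (s.drop (k + 1)) ((0 : Int) + (s.take (k + 1)).length) := by
      conv_lhs => rw [← List.take_append_drop (k + 1) s, PySem.List.enumerate_append]
    have hposOf : posOf s = PySem.Dict.mk
        (((PySem.List.enumerate (s.take (k + 1))).map (fun p => (p.2, p.1)))
          ++ ((PySem.List.enumerate (s.drop (k + 1)) ((0 : Int) + (s.take (k + 1)).length)).map (fun p => (p.2, p.1)))) := by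
      rw [posOf, hsplit, List.map_append]
    rw [hposOf]
    apply foldl_erase_tail
    · rw [List.map_map,
        show ((fun x : (Int × Int) × Int => x.1) ∘ (fun p : Int × (Int × Int) => (p.2, p.1)))
          = (fun p : Int × (Int × Int) => p.2) from rfl,
        PySem.List.map_snd_enumerate]
    · exact ((List.drop_sublist _ _).nodup hnd)
    · -- keys of the kept prefix are not among the dropped elements
      intro r hr hmem
      have hmem' : r ∈ s.take (k + 1) := by
        rw [List.map_map,
          show ((fun x : (Int × Int) × Int => x.1) ∘ (fun p : Int × (Int × Int) => (p.2, p.1)))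
            = (fun p : Int × (Int × Int) => p.2) from rfl,
          PySem.List.map_snd_enumerate] at hmem
        exact hmem
      exact (List.disjoint_take_drop hnd (le_refl (k + 1))) hmem' hr

theorem fold_alt (P : List (Int × Int)) :
    ∀ (s : List (Int × Int)), s.Nodup →
    P.foldl loopEraseStep (s, posOf s)
      = (P.foldl stepB s, posOf (P.foldl stepB s)) := by
  induction P with
  | nil => intro s _; simp
  | cons x P IH =>
    intro s hnd
    rw [List.foldl_cons, stepB_fold_step s x hnd, List.foldl_cons]
    exact IH (stepB s x) (nodup_stepB x hnd)

theorem alt_eq_leSpec (path : List (Int × Int)) : loop_erasure_alt path = leSpec path := by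
  rw [loop_erasure_alt]
  have hempty : PySem.Dict.empty = posOf ([] : List (Int × Int)) := by decide
  rw [hempty, fold_alt path [] List.nodup_nil]
  exact leSpec_eq_stackOf path

-- ===== A-side =====

-- the index of the last occurrence of pt in path, if any
def lastIdx? (path : List (Int × Int)) (pt : Int × Int) : Option Nat :=
  (PySem.List.index? path.reverse pt).map (fun k => path.length - 1 - k)

theorem latest_dict_get? (path : List (Int × Int)) (pt : Int × Int) :
    ((PySem.List.enumerate path).foldl (fun acc p => acc.insert p.2 p.1) PySem.Dict.empty).get? pt
      = (lastIdx? path pt).map (fun k => (k : Int)) := by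
  induction path using List.reverseRecOn with
  | nil => simp [PySem.List.enumerate_nil, lastIdx?, PySem.List.index?_eq_idxOf?, PySem.Dict.get?, PySem.Dict.empty]
  | append_singleton P y IH =>
    rw [show PySem.List.enumerate (P ++ [y]) = PySem.List.enumerate P ++ [((0 + P.length : Int), y)] by
      rw [PySem.List.enumerate_append]; rfl]
    rw [List.foldl_append, List.foldl_cons, List.foldl_nil]
    rw [PySem.Dict.get?_insert]
    by_cases hpy : pt = y
    · subst hpy
      rw [if_pos rfl]
      rw [lastIdx?, List.reverse_append]
      simp only [List.reverse_singleton, List.singleton_append]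
      rw [PySem.List.index?_cons_self]
      simp
    · rw [if_neg hpy, IH]
      rw [lastIdx?, lastIdx?, List.reverse_append]
      simp only [List.reverse_singleton, List.singleton_append]
      rw [PySem.List.index?_cons_of_ne _ (fun he => hpy he.symm)]
      cases hidx : PySem.List.index? P.reverse pt with
      | none => simp
      | some k =>
        obtain ⟨hk, -, -⟩ := PySem.List.getElem_of_index?_eq_some hidx
        rw [List.length_reverse] at hk
        simp only [Option.map_some, List.length_append, List.length_cons, List.length_nil]
        have h1 : P.length + 1 - 1 - (k + 1) = P.length - 1 - k := by omega
        rw [h1]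

theorem lastIdx?_getElem {path : List (Int × Int)} {pt : Int × Int} {k : Nat}
    (h : lastIdx? path pt = some k) : k < path.length ∧ path[k]? = some pt ∧
      ∀ m, k < m → path[m]? ≠ some pt := by
  rw [lastIdx?] at h
  cases hidx : PySem.List.index? path.reverse pt with
  | none => rw [hidx] at h; simp at h
  | some j =>
    rw [hidx] at h
    simp only [Option.map_some, Option.some.injEq] at h
    obtain ⟨hj, hget, hmin⟩ := PySem.List.getElem_of_index?_eq_some hidx
    rw [List.length_reverse] at hj
    subst h
    refine ⟨by omega, ?_, ?_⟩
    · rw [← List.getElem?_reverse (by omega), List.getElem?_eq_getElem (by simpa using hj)]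
      exact congrArg some hget
    · intro m hm hcontra
      have hmlen : m < path.length := by
        by_contra hh
        rw [List.getElem?_eq_none (by omega)] at hcontra
        exact absurd hcontra (by simp)
      have hms : path.length - 1 - (path.length - 1 - m) = m := by omega
      have hrev : path.reverse[path.length - 1 - m]? = some pt := by
        rw [List.getElem?_reverse (by omega), hms]
        exact hcontra
      rw [List.getElem?_eq_getElem (by simp; omega)] at hrev
      exact hmin (path.length - 1 - m) (by omega) (Option.some.inj hrev)

theorem lastIdx?_of_getElem {path : List (Int × Int)} {pt : Int × Int} {i : Nat}
    (hi : i < path.length) (h : path[i] = pt) :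
    ∃ k, lastIdx? path pt = some k ∧ i ≤ k := by
  have hmem : pt ∈ path.reverse := by
    rw [List.mem_reverse]; exact h ▸ List.getElem_mem hi
  have hsome : (PySem.List.index? path.reverse pt).isSome := by
    rw [PySem.List.index?_isSome_iff]; exact hmem
  obtain ⟨j, hj⟩ := Option.isSome_iff_exists.mp hsome
  refine ⟨path.length - 1 - j, by rw [lastIdx?, hj]; rfl, ?_⟩
  by_contra hlt
  rw [not_le] at hlt
  have := (lastIdx?_getElem (by rw [lastIdx?, hj]; rfl)).2.2 i hlt
  rw [List.getElem?_eq_getElem hi] at this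
  exact this (by rw [h])

theorem not_mem_drop_of_lastIdx {path : List (Int × Int)} {pt : Int × Int} {k : Nat}
    (h : lastIdx? path pt = some k) : pt ∉ path.drop (k + 1) := by
  intro hmem
  obtain ⟨m, hm, hget⟩ := List.getElem_of_mem hmem
  rw [List.getElem_drop] at hget
  have := (lastIdx?_getElem h).2.2 (k + 1 + m) (by omega)
  rw [List.getElem?_eq_getElem (by rw [List.length_drop] at hm; omega)] at this
  exact this (by rw [hget])

theorem loop_lemma (path : List (Int × Int)) :
    ∀ (fuel : Nat) (n : Nat) (acc : List (Int × Int)), path.length - n ≤ fuel →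
    loopErasureWhile path
      ((PySem.List.enumerate path).foldl (fun acc p => acc.insert p.2 p.1) PySem.Dict.empty)
      fuel (n : Int) acc = acc ++ leSpec (path.drop n) := by
  intro fuel
  induction fuel with
  | zero =>
    intro n acc hfuel
    have : path.length ≤ n := by omega
    rw [loopErasureWhile, List.drop_eq_nil_of_le this, leSpec]
    simp
  | succ fuel IH =>
    intro n acc hfuel
    rw [loopErasureWhile]
    by_cases hn : n < path.length
    · rw [if_pos (by exact_mod_cast hn)]
      rw [PySem.List.pyGet?_natCast, List.getElem?_eq_getElem hn]
      set pt := path[n] with hpt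
      obtain ⟨k, hk, hnk⟩ := lastIdx?_of_getElem hn rfl
      rw [← hpt] at hk
      simp only [latest_dict_get?, hk, Option.map_some, Option.bind_some, Option.pure_def,
        Option.bind_eq_bind]
      have hklen := (lastIdx?_getElem hk).1
      have hcast : (k : Int) + 1 = ((k + 1 : Nat) : Int) := by push_cast; ring
      rw [hcast, IH (k + 1) (acc ++ [pt]) (by omega)]
      rw [List.append_assoc]
      congr 1
      -- leSpec (drop n path) = pt :: leSpec (drop (k+1) path)
      have hdropn : path.drop n = pt :: path.drop (n + 1) :=
        List.drop_eq_getElem_cons hn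
      rw [hdropn, leSpec]
      simp only [List.cons_append, List.nil_append, List.cons.injEq, true_and]
      congr 1
      -- dropAfterLast pt (drop (n+1) path) = drop (k+1) path
      have hnotmem : pt ∉ path.drop (k + 1) := not_mem_drop_of_lastIdx hk
      rcases Nat.eq_or_lt_of_le hnk with heq | hlt
      · subst heq
        exact (dropAfterLast_of_not_mem hnotmem).symm
      · have hdecomp : path.drop (n + 1) =
            (path.drop (n + 1)).take (k - (n + 1)) ++ pt :: path.drop (k + 1) := by
          conv_lhs => rw [← List.take_append_drop (k - (n + 1)) (path.drop (n + 1))]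
          congr 1
          rw [List.drop_drop]
          rw [show n + 1 + (k - (n + 1)) = k by omega]
          have hdropk : path.drop k = path[k] :: path.drop (k + 1) :=
            List.drop_eq_getElem_cons hklen
          rw [hdropk]
          congr 1
          have := (lastIdx?_getElem hk).2.1
          rw [List.getElem?_eq_getElem hklen] at this
          exact Option.some.injEq _ _ ▸ this
        rw [hdecomp]
        exact (dropAfterLast_append_cons _ hnotmem).symm
    · rw [if_neg (by exact_mod_cast hn)]
      rw [List.drop_eq_nil_of_le (by omega), leSpec]
      simp

theorem a_eq_leSpec (path : List (Int × Int)) : loop_erasure path = leSpec path := by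
  rw [loop_erasure]
  have := loop_lemma path path.length 0 [] (by omega)
  simpa using this

-- ===== VERDICT (by name: the statement is the Claim_ definition above) =====
theorem loop_erasure_spec : Claim_equal_loop_erasure := by
  intro path _
  show loop_erasure path = loop_erasure_alt path
  rw [a_eq_leSpec, alt_eq_leSpec]
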